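-- pv_equiv track=rewrite | github.com/ma1onso/technical-test-zina | src/bouncy_numbers.py | increasing_number
-- ===== SOURCE A (Python) =====
-- def increasing_number(numbers):
--     """ Working from left-to-right if no digit is exceeded by the digit to
--     its left it is called an increasing number; for example, 134468
--
--     :param list numbers: split number into a list
--     :return: True if number is increasing, False if not
--     :rtype: bool
--     """
--     index = 0
--     # Reverse list
--     numbers = numbers[::-1]
--
--     for number in numbers:
--         if len(numbers) - 1 > index and not number >= numbers[index + 1]:
--             return False
--
--         index += 1
--
--     return True
-- ===== SOURCE B (Python) =====
-- def increasing_number(numbers):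
--     """True iff the digit list is non-decreasing: compare with a sorted copy."""
--     return numbers == sorted(numbers)
-- ===== Notes on version B (the rewrite author's own statement) =====
-- stated objective: simpler
-- what changed: Replaces A's reverse-then-scan-adjacent-pairs loop with a sort-and-compare: B returns numbers == sorted(numbers), with no reversal, no index arithmetic and no explicit loop.
import Mathlib
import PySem

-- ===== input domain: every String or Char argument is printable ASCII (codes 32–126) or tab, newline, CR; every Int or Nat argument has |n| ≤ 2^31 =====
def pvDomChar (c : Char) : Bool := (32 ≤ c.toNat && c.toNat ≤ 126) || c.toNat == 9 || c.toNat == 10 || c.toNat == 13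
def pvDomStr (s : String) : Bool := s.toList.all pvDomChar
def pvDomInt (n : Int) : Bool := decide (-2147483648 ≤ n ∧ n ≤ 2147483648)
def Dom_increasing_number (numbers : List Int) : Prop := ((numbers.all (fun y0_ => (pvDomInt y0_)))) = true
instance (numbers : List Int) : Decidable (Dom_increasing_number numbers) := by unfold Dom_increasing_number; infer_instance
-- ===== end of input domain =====

-- B replaces A's reverse-then-adjacent-pair scan by `numbers == sorted(numbers)` (simpler; same return value).

-- ===== PORT A =====
-- the for-loop over the reversed list: state = remaining elements + the running index
def pyLoopA (rev : List Int) : List Int → Int → Bool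
  | [], _ => true
  | n :: rest, idx =>
    if (rev.length : Int) - 1 > idx ∧ ¬ (n ≥ PySem.List.pyGetD rev (idx + 1) 0) then
      false
    else
      pyLoopA rev rest (idx + 1)

def increasing_number (numbers : List Int) : Bool :=
  -- numbers[::-1] is List.reverse (PySem.List.slice?_none_none_neg_one)
  let rev := numbers.reverse
  pyLoopA rev rev 0

-- ===== PORT B =====
def increasing_number_alt (numbers : List Int) : Bool :=
  numbers == PySem.List.sorted numbers (fun x => x)

-- ===== PRECONDITION & SPEC =====
def Spec_increasing_number (numbers : List Int) (out : Bool) : Prop := out = increasing_number_alt numbers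
instance (numbers : List Int) (out : Bool) : Decidable (Spec_increasing_number numbers out) := by unfold Spec_increasing_number; infer_instance

-- ===== CLAIM (what is proved, stated in full; the proofs are below) =====
def Claim_equal_increasing_number : Prop := ∀ (numbers : List Int), Dom_increasing_number numbers → Spec_increasing_number numbers (increasing_number numbers)

-- ===== LEMMAS AND PROOFS =====

-- A's loop on a suffix `l` of `rev` starting at index `idx` returns true
-- iff the suffix is an adjacent-pairs ≥-chain.
theorem pyLoopA_true_iff (rev : List Int) (l : List Int) (idx : Int)
    (h0 : 0 ≤ idx) (hd : rev.drop idx.toNat = l) :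
    pyLoopA rev l idx = true ↔ l.IsChain (fun a b => b ≤ a) := by
  induction l generalizing idx with
  | nil => simp [pyLoopA]
  | cons n rest ih =>
    have hlen : rev.length = idx.toNat + rest.length + 1 := by
      have := congrArg List.length hd
      simp [List.length_drop] at this
      omega
    cases rest with
    | nil =>
      have hcond : ¬ ((rev.length : Int) - 1 > idx) := by
        simp [hlen]; omega
      rw [pyLoopA, if_neg (by push Not; intro h; exact absurd h hcond)]
      simp [pyLoopA]
    | cons m rest' =>
      have hcond : (rev.length : Int) - 1 > idx := by
        simp [hlen]; omega
      have hget : PySem.List.pyGetD rev (idx + 1) 0 = m := by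
        rw [PySem.List.pyGetD_of_nonneg rev 0 (by omega)]
        have h1 : (idx + 1).toNat = idx.toNat + 1 := by omega
        have hlt : idx.toNat + 1 < rev.length := by omega
        rw [h1, List.getD_eq_getElem rev 0 hlt]
        have : rev.drop (idx.toNat + 1) = m :: rest' := by
          rw [← List.drop_drop, hd]; rfl
        have h2 : (rev.drop (idx.toNat + 1))[0]'(by simp [List.length_drop]; omega) = rev[idx.toNat + 1]'hlt := by
          rw [List.getElem_drop]
        rw [← h2]; simp [this]
      by_cases hnm : m ≤ n
      · have : ¬ ((rev.length : Int) - 1 > idx ∧ ¬ (n ≥ PySem.List.pyGetD rev (idx + 1) 0)) := by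
          rw [hget]; push Not; intro _; exact hnm
        rw [pyLoopA, if_neg this,
          ih (idx + 1) (by omega) (by rw [show (idx + 1).toNat = idx.toNat + 1 by omega, ← List.drop_drop, hd]; rfl),
          List.isChain_cons_cons]
        constructor
        · exact fun h => ⟨hnm, h⟩
        · exact fun h => h.2
      · have : ((rev.length : Int) - 1 > idx ∧ ¬ (n ≥ PySem.List.pyGetD rev (idx + 1) 0)) := by
          rw [hget]; exact ⟨hcond, hnm⟩
        rw [pyLoopA, if_pos this, List.isChain_cons_cons]
        simp [hnm]

-- B returns true iff the list is pairwise non-decreasing.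
theorem alt_true_iff (numbers : List Int) :
    increasing_number_alt numbers = true ↔ numbers.Pairwise (· ≤ ·) := by
  unfold increasing_number_alt
  rw [beq_iff_eq]
  constructor
  · intro h
    have := PySem.List.sorted_pairwise numbers (fun x => x)
    rw [← h] at this
    exact this
  · intro h
    exact (PySem.List.sorted_eq_self_of_pairwise numbers (fun x => x) h).symm

-- ===== VERDICT (by name: the statement is the Claim_ definition above) =====
theorem increasing_number_spec : Claim_equal_increasing_number := by
  intro numbers _
  unfold Spec_increasing_number
  have hA : increasing_number numbers = true ↔ numbers.Pairwise (· ≤ ·) := by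
    unfold increasing_number
    rw [pyLoopA_true_iff numbers.reverse numbers.reverse 0 (by norm_num) (by simp)]
    rw [List.isChain_reverse]
    rw [List.isChain_iff_pairwise]
  rw [Bool.eq_iff_iff, hA, alt_true_iff]
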